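-- pv_equiv track=rewrite | github.com/xma4602/Glados_Bot | src/parse.py | users_names
-- ===== SOURCE A (Python) =====
-- users = {
--     'гудков': '148866296',
--     'мезенцев': '62393212',
--     'макурин': '210242776',
--     'ханов': '257165020',
--     'ган': '83886005',
--     'казанцев': '134621926',
--     'юсупов': '100822494',
--     'фунин': '168944389',
--     'мурзина': '739900329',
--     'маркарян': '322610705'
-- }
--
-- def users_names(users_id: list):
--     """
--     Получиет имена пользователей и возвращает их id
--     :param users_id: список фамилий пользователей
--     :return: список соответствующих фамилиям id
--     """
--     names = []
--     for user_id in users_id: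
--         for name, id in users.items():
--             if id == user_id:
--                 names.append(name)
--                 break
--
--     return names
-- ===== SOURCE B (Python) =====
-- users = {
--     'гудков': '148866296',
--     'мезенцев': '62393212',
--     'макурин': '210242776',
--     'ханов': '257165020',
--     'ган': '83886005',
--     'казанцев': '134621926',
--     'юсупов': '100822494',
--     'фунин': '168944389',
--     'мурзина': '739900329',
--     'маркарян': '322610705'
-- }
--
-- def users_names(users_id: list):
--     # Transposed traversal: outer loop over the fixed users table, inner over the
--     # queries; collect (position, name) matches, then sort by position to restore
--     # the input order and project out the names.
--     matches = []
--     for name, uid in users.items():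
--         for pos, x in enumerate(users_id):
--             if x == uid:
--                 matches.append((pos, name))
--     matches.sort(key=lambda t: t[0])
--     return [name for _, name in matches]
-- ===== Notes on version B (the rewrite author's own statement) =====
-- stated objective: alternative
-- what changed: B transposes the loop nesting: it iterates the fixed users table in the outer loop, scans the queries in the inner loop collecting (position, name) matches, then sorts the matches by position and projects the names, instead of A's per-query scan over the table appending in query order.
import Mathlib
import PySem

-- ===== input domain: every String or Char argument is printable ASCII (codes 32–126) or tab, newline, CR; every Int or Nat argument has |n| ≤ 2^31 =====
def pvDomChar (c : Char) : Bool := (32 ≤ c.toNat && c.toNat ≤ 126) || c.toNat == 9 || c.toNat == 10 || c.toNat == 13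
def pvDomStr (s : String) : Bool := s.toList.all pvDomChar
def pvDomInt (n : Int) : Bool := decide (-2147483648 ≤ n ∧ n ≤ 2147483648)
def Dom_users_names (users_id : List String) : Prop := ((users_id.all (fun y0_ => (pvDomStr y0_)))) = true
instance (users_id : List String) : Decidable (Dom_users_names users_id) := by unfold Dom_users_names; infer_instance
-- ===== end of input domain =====

-- B transposes the traversal: outer loop over the fixed users table, inner scan of the
-- queries collecting (position, name) matches, then sort by position and project names
-- (alternative algorithm; same result because table ids are distinct and positions are unique).

-- ===== PORT A =====
-- the module-level dict `users`, in insertion order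
def usersDict : List (String × String) :=
  [("гудков", "148866296"), ("мезенцев", "62393212"), ("макурин", "210242776"),
   ("ханов", "257165020"), ("ган", "83886005"), ("казанцев", "134621926"),
   ("юсупов", "100822494"), ("фунин", "168944389"), ("мурзина", "739900329"),
   ("маркарян", "322610705")]

-- inner loop of A: 'for name, id in users.items(): if id == user_id: append + break'
def scanUsers (items : List (String × String)) (user_id : String) : Option String :=
  match items with
  | [] => none
  | (name, id) :: rest => if id == user_id then some name else scanUsers rest user_id

def users_names (users_id : List String) : List String :=
  users_id.foldl (fun names user_id =>
    match scanUsers usersDict user_id with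
    | some name => names ++ [name]
    | none => names) []

-- ===== PORT B =====
-- outer loop over users.items(), inner loop over enumerate(users_id); then
-- matches.sort(key=lambda t: t[0]); return [name for _, name in matches]
def users_names_alt (users_id : List String) : List String :=
  let ms := usersDict.foldl (fun m p =>
      (PySem.List.enumerate users_id 0).foldl
        (fun m2 q => if q.2 == p.2 then m2 ++ [(q.1, p.1)] else m2) m) []
  (PySem.List.sorted ms (fun t => t.1) false).map (fun t => t.2)

-- ===== PRECONDITION & SPEC =====
def Spec_users_names (users_id : List String) (out : List String) : Prop := out = users_names_alt users_id
instance (users_id : List String) (out : List String) : Decidable (Spec_users_names users_id out) := by unfold Spec_users_names; infer_instance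

-- ===== CLAIM (what is proved, stated in full; the proofs are below) =====
def Claim_equal_users_names : Prop := ∀ (users_id : List String), Dom_users_names users_id → Spec_users_names users_id (users_names users_id)

-- ===== LEMMAS AND PROOFS =====

-- the matches contributed by one table entry p, on an indexed query list l
def entryMatches (l : List (Int × String)) (p : String × String) : List (Int × String) :=
  (l.filter (fun q => q.2 == p.2)).map (fun q => (q.1, p.1))

-- the matches listed in query order (what A effectively produces, paired with positions)
def orderedMatches (l : List (Int × String)) : List (Int × String) :=
  l.filterMap (fun q => (scanUsers usersDict q.2).map (fun n => (q.1, n)))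

-- A's outer loop is a filterMap of its inner scan
theorem users_names_eq_filterMap (users_id : List String) :
    users_names users_id = users_id.filterMap (scanUsers usersDict) := by
  unfold users_names
  suffices h : ∀ (l acc : List String),
      l.foldl (fun names user_id =>
        match scanUsers usersDict user_id with
        | some name => names ++ [name]
        | none => names) acc = acc ++ l.filterMap (scanUsers usersDict) by
    simpa using h users_id []
  intro l
  induction l with
  | nil => simp
  | cons x xs ih =>
    intro acc
    simp only [List.foldl, List.filterMap_cons]
    cases h : scanUsers usersDict x <;> simp [ih, List.append_assoc]

-- B's double foldl builds the flatMap of per-entry match lists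
theorem matches_eq_flatMap (users_id : List String) :
    usersDict.foldl (fun m p =>
      (PySem.List.enumerate users_id 0).foldl
        (fun m2 q => if q.2 == p.2 then m2 ++ [(q.1, p.1)] else m2) m) []
    = usersDict.flatMap (entryMatches (PySem.List.enumerate users_id 0)) := by
  have hfun : (fun (m : List (Int × String)) p =>
      (PySem.List.enumerate users_id 0).foldl
        (fun m2 q => if q.2 == p.2 then m2 ++ [(q.1, p.1)] else m2) m)
      = fun m p => m ++ entryMatches (PySem.List.enumerate users_id 0) p := by
    funext m p
    simpa [entryMatches] using
      PySem.List.foldl_append_if (fun q => q.2 == p.2) (fun q => (q.1, p.1))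
        (PySem.List.enumerate users_id 0) m
  rw [hfun, PySem.List.foldl_append_eq_flatMap]
  simp

-- if x is not among the table values, no entry matches it
theorem flat_head_none (d : List (String × String)) (i : Int) (x : String)
    (hx : x ∉ d.map (·.2)) :
    d.flatMap (fun p => if (x == p.2) = true then [(i, p.1)] else []) = [] := by
  induction d with
  | nil => rfl
  | cons p rest ih =>
    simp only [List.map_cons, List.mem_cons, not_or] at hx
    simp only [List.flatMap_cons]
    rw [if_neg (by simpa [beq_iff_eq] using hx.1), ih hx.2]
    rfl

-- with distinct table values, the per-entry matches of a single query collapse to its scan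
theorem flat_head (d : List (String × String)) (hd : (d.map (·.2)).Nodup) (i : Int) (x : String) :
    d.flatMap (fun p => if (x == p.2) = true then [(i, p.1)] else [])
    = (match scanUsers d x with | some n => [(i, n)] | none => []) := by
  induction d with
  | nil => rfl
  | cons p rest ih =>
    obtain ⟨name, id⟩ := p
    simp only [List.map_cons, List.nodup_cons] at hd
    simp only [List.flatMap_cons, scanUsers]
    by_cases h : x = id
    · have hx : x ∉ rest.map (·.2) := h ▸ hd.1
      rw [if_pos (by simp [h]), if_pos (by simp [h]), flat_head_none rest i x hx]
      rfl
    · rw [if_neg (by simpa [beq_iff_eq] using h),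
          if_neg (by simpa [beq_iff_eq] using fun e => h e.symm), ih hd.2]
      rfl

-- the flat match list is a permutation of the matches listed in query order
theorem flatMap_perm_ordered (l : List (Int × String)) :
    (usersDict.flatMap (entryMatches l)).Perm (orderedMatches l) := by
  induction l with
  | nil => simp [entryMatches, orderedMatches]
  | cons q l ih =>
    have hsplit : entryMatches (q :: l)
        = fun p => (if (q.2 == p.2) = true then [(q.1, p.1)] else []) ++ entryMatches l p := by
      funext p
      simp only [entryMatches, List.filter_cons]
      by_cases h : (q.2 == p.2) = true <;> simp [h]
    rw [hsplit]
    refine ((List.flatMap_append_perm usersDict _ _).symm).trans ?_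
    rw [flat_head usersDict (by decide) q.1 q.2]
    simp only [orderedMatches, List.filterMap_cons]
    cases h : scanUsers usersDict q.2 <;>
      simpa [orderedMatches] using ih

-- positions in the ordered match list are strictly increasing
theorem ordered_pairwise (users_id : List String) :
    (orderedMatches (PySem.List.enumerate users_id 0)).Pairwise (fun a b => a.1 < b.1) := by
  have henum : (PySem.List.enumerate users_id 0).Pairwise (fun a b => a.1 < b.1) := by
    have := PySem.List.pairwise_lt_pyRange_one (a := 0) (b := 0 + (users_id.length : Int))
    rw [← PySem.List.map_fst_enumerate users_id 0] at this
    exact (List.pairwise_map.mp this)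
  unfold orderedMatches
  refine List.Pairwise.filterMap _ ?_ henum
  intro a b hab x hx y hy
  cases ha : scanUsers usersDict a.2 <;> rw [ha] at hx
  · exact absurd hx (by simp)
  cases hb : scanUsers usersDict b.2 <;> rw [hb] at hy
  · exact absurd hy (by simp)
  simp only [Option.map_some, Option.some.injEq] at hx hy
  subst hx; subst hy
  exact hab

-- projecting names from the ordered matches gives A's filterMap
theorem map_snd_ordered (l : List (Int × String)) :
    (orderedMatches l).map (fun t => t.2) = (l.map (·.2)).filterMap (scanUsers usersDict) := by
  induction l with
  | nil => rfl
  | cons q l ih =>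
    simp only [orderedMatches, List.filterMap_cons, List.map_cons] at ih ⊢
    cases h : scanUsers usersDict q.2 <;> simp [ih]

-- ===== VERDICT (by name: the statement is the Claim_ definition above) =====
theorem users_names_spec : Claim_equal_users_names := by
  intro users_id _
  simp only [Spec_users_names, users_names_alt]
  rw [matches_eq_flatMap]
  rw [PySem.List.sorted_eq_of_perm_of_pairwise_lt
        (usersDict.flatMap (entryMatches (PySem.List.enumerate users_id 0)))
        (orderedMatches (PySem.List.enumerate users_id 0)) (fun t => t.1)
        ((flatMap_perm_ordered (PySem.List.enumerate users_id 0)).symm)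
        (ordered_pairwise users_id)]
  rw [map_snd_ordered, PySem.List.map_snd_enumerate, users_names_eq_filterMap]
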